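-- pv_equiv track=rewrite | github.com/Deanhz/normal_works | algorithm-books/程序员面试指南/python/字符串/去掉字符串中连续出现k个0的子串.py | removeKzeros
-- ===== SOURCE A (Python) =====
-- def removeKzeros(str1, k):
--     if not str1 or k < 0:
--         return str1
--     n = len(str1)
--     result = list(str1)
--     count = 0
--     start = -1
--     for i in range(n):
--         c = result[i]
--         if c == "0":
--             start = i if start == -1 else start
--             count += 1
--         else:
--             if count == k:
--                 while(k>0):
--                     result[start] = ""
--                     start += 1
--                     k -= 1
--             count = 0
--             start = -1
--     if count == k:
--         while(k > 0):
--             result[start] = ""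
--             k -= 1
--             start += 1
--     return "".join(result)
-- ===== SOURCE B (Python) =====
-- def removeKzeros(str1, k):
--     # Two staged passes over a run-length encoding: (1) compress the string
--     # into maximal (char, count) runs, (2) decode the runs back, skipping the
--     # first '0'-run whose count is exactly k (A only ever removes the first
--     # such run, since it consumes k while blanking).
--     if not str1 or k <= 0:
--         return str1
--     # pass 1: run-length encode
--     runs = []
--     cur, cnt = str1[0], 0
--     for c in str1:
--         if c == cur:
--             cnt += 1
--         else:
--             runs.append((cur, cnt))
--             cur, cnt = c, 1
--     runs.append((cur, cnt))
--     # pass 2: decode, dropping the first zero-run of length exactly k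
--     out = []
--     removed = False
--     for c, m in runs:
--         if not removed and c == '0' and m == k:
--             removed = True
--         else:
--             out.append(c * m)
--     return ''.join(out)
-- ===== Notes on version B (the rewrite author's own statement) =====
-- stated objective: alternative
-- what changed: Replaces A's single stateful scan (count/start bookkeeping with in-place blanking of list cells) by two staged passes over a run-length encoding: first compress the string into maximal (char,count) runs, then decode the runs back while skipping the first zero-run of count exactly k.
import Mathlib
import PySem

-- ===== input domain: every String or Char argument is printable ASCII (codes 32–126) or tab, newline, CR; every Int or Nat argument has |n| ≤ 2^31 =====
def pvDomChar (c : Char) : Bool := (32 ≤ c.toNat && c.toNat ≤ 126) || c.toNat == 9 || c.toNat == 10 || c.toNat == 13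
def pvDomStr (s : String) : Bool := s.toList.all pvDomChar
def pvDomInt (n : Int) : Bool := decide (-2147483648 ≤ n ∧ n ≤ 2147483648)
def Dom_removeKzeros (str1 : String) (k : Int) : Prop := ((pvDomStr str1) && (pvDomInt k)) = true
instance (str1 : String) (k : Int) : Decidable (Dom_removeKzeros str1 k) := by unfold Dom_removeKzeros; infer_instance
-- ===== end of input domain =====

-- B replaces A's single stateful blanking scan by two staged passes over a run-length
-- encoding: compress into (char, count) runs, then decode skipping the first zero-run
-- of count exactly k (objective: alternative).

-- ===== PORT A =====
-- inner `while(k>0): result[start] = ""; start += 1; k -= 1`, returning (result, k).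
-- Python's result[start] = "" is pySetD: whenever 0 < k holds here, count == k > 0 held, so 0 ≤ start < len(result).
theorem pvDecInt (k : Int) (h : 0 < k) : (k - 1).toNat < k.toNat := by omega

def pvBlankA (res : List String) (start : Int) (k : Int) : List String × Int :=
  if 0 < k then pvBlankA (PySem.List.pySetD res start "") (start + 1) (k - 1) else (res, k)
termination_by k.toNat
decreasing_by exact pvDecInt k (by assumption)

theorem pvDecNat (i n : Nat) (h : i < n) : n - (i + 1) < n - i := by omega

-- `for i in range(n): ...` transcribed as recursion on the index i; state (result, count, start, k).
def pvLoopA (res : List String) (count start k : Int) (i n : Nat) : List String × Int × Int × Int :=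
  if i < n then
    -- c = result[i]; i < n = len(result), so Python cannot raise here
    if PySem.List.pyGetD res (i : Int) "" = "0" then
      pvLoopA res (count + 1) (if start = -1 then (i : Int) else start) k (i + 1) n
    else if count = k then
      pvLoopA (pvBlankA res start k).1 0 (-1) (pvBlankA res start k).2 (i + 1) n
    else
      pvLoopA res 0 (-1) k (i + 1) n
  else (res, count, start, k)
termination_by n - i
decreasing_by
  · exact pvDecNat i n (by assumption)
  · exact pvDecNat i n (by assumption)
  · exact pvDecNat i n (by assumption)

-- the trailing `if count == k: while(k > 0): ...` after the for loop
def pvFinalA (r : List String × Int × Int × Int) : List String :=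
  if r.2.1 = r.2.2.2 then (pvBlankA r.1 r.2.2.1 r.2.2.2).1 else r.1

def removeKzeros (str1 : String) (k : Int) : String :=
  if str1 = "" ∨ k < 0 then str1
  else
    -- result = list(str1): each cell a one-character string; "".join(result) at the end
    PySem.Str.join ""
      (pvFinalA (pvLoopA (str1.toList.map (fun c => String.ofList [c])) 0 (-1) k 0 str1.toList.length))

-- ===== PORT B =====
-- pass 1: `for c in str1: ...` building (cur, cnt) runs; state (runs, cur, cnt), trailing append at the end
def pvEnc (s : List Char) (runs : List (Char × Int)) (cur : Char) (cnt : Int) : List (Char × Int) :=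
  match s with
  | [] => runs ++ [(cur, cnt)]
  | c :: rest =>
    if c = cur then pvEnc rest runs cur (cnt + 1)
    else pvEnc rest (runs ++ [(cur, cnt)]) c 1

-- pass 2: `for c, m in runs: ...`; state (removed, out).
-- Python's `c * m` on the one-character string c is String.ofList (pyRepeat [c] m) (exact for every Int m)
def pvDec (runs : List (Char × Int)) (k : Int) (removed : Bool) (out : List String) : Bool × List String :=
  match runs with
  | [] => (removed, out)
  | (c, m) :: rs =>
    if removed = false ∧ c = '0' ∧ m = k then pvDec rs k true out
    else pvDec rs k removed (out ++ [String.ofList (PySem.List.pyRepeat [c] m)])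

def removeKzeros_alt (str1 : String) (k : Int) : String :=
  if str1 = "" ∨ k ≤ 0 then str1
  else
    match str1.toList with
    | [] => str1  -- unreachable: the guard ensures str1 ≠ ""
    | c0 :: rest =>
      -- cur, cnt = str1[0], 0; then the encode loop over all of str1, then decode and ''.join
      PySem.Str.join "" (pvDec (pvEnc (c0 :: rest) [] c0 0) k false []).2

-- ===== PRECONDITION & SPEC =====
def Spec_removeKzeros (str1 : String) (k : Int) (out : String) : Prop := out = removeKzeros_alt str1 k
instance (str1 : String) (k : Int) (out : String) : Decidable (Spec_removeKzeros str1 k out) := by unfold Spec_removeKzeros; infer_instance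

-- ===== CLAIM (what is proved, stated in full; the proofs are below) =====
def Claim_equal_removeKzeros : Prop := ∀ (str1 : String) (k : Int), Dom_removeKzeros str1 k → Spec_removeKzeros str1 k (removeKzeros str1 k)

-- ===== LEMMAS AND PROOFS =====

theorem pvEnc_cons (c : Char) (rest : List Char) (runs : List (Char × Int)) (cur : Char) (cnt : Int) :
    pvEnc (c :: rest) runs cur cnt
      = (if c = cur then pvEnc rest runs cur (cnt + 1)
         else pvEnc rest (runs ++ [(cur, cnt)]) c 1) := rfl

theorem pvJoin_flatten (l : List (List Char)) : PySem.Chars.join [] l = l.flatten := by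
  match l with
  | [] => simp [PySem.Chars.join_nil]
  | [p] => simp [PySem.Chars.join_singleton]
  | p :: q :: rest =>
    rw [PySem.Chars.join_cons_cons]
    rw [pvJoin_flatten (q :: rest)]
    simp

def pvB0 (s : List Char) : List String := s.map (fun ch => String.ofList [ch])

theorem pvJoin_mixed (a : List Char) (b : List String) (c : List Char)
    (hb : ∀ x ∈ b, x = "") :
    PySem.Str.join "" (pvB0 a ++ (b ++ pvB0 c)) = String.ofList (a ++ c) := by
  have key : (PySem.Str.join "" (pvB0 a ++ (b ++ pvB0 c))).toList = a ++ c := by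
    rw [PySem.Str.toList_join, show ("" : String).toList = ([] : List Char) from by decide,
      pvJoin_flatten]
    have hmk : ∀ (l : List Char), (pvB0 l).map String.toList = l.map (fun ch => [ch]) := by
      intro l; simp [pvB0]
    have hbl : b.map String.toList = b.map (fun _ => ([] : List Char)) := by
      apply List.map_congr_left
      intro x hx; rw [hb x hx]; rfl
    have hfl : ∀ (l : List Char), (l.map (fun ch => [ch])).flatten = l := by
      intro l
      induction l with
      | nil => rfl
      | cons x xs ihl => simp [ihl]
    simp [hmk, hbl, List.flatten_append, hfl]
  rw [← key]
  exact (String.ofList_eq.mpr rfl).symm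

theorem pvJoin_sing (cs : List Char) :
    PySem.Str.join "" (pvB0 cs) = String.ofList cs := by
  have := pvJoin_mixed cs [] [] (by simp)
  simpa [pvB0] using this

theorem pvBlankA_snd (res : List String) (start k : Int) (hk : 0 ≤ k) :
    (pvBlankA res start k).2 = 0 := by
  rw [pvBlankA]
  split
  · exact pvBlankA_snd _ _ _ (by omega)
  · simp; omega
termination_by k.toNat
decreasing_by omega

theorem pvSet_append_length {α : Type} (pre : List α) (x v : α) (rest : List α) :
    (pre ++ x :: rest).set pre.length v = pre ++ v :: rest := by
  induction pre with
  | nil => rfl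
  | cons h t ih => simp [ih]

theorem pvBlankA_fst (mid : List String) :
    ∀ (pre suf : List String),
    (pvBlankA (pre ++ (mid ++ suf)) (pre.length : Int) (mid.length : Int)).1
      = pre ++ (mid.map (fun _ => "") ++ suf) := by
  induction mid with
  | nil => intro pre suf; rw [pvBlankA]; simp
  | cons m ms ih =>
    intro pre suf
    rw [pvBlankA]
    rw [if_pos (by simp : (0 : Int) < ((m :: ms).length : Int))]
    have h1 : PySem.List.pySetD (pre ++ (m :: ms ++ suf)) (pre.length : Int) "" =
        (pre ++ [("" : String)]) ++ (ms ++ suf) := by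
      rw [PySem.List.pySetD_natCast]
      rw [show pre ++ ((m :: ms) ++ suf) = pre ++ m :: (ms ++ suf) by simp]
      rw [pvSet_append_length]
      simp
    rw [h1]
    have h2 : ((pre.length : Int) + 1) = (((pre ++ [("" : String)]).length : Nat) : Int) := by
      simp
    have h3 : (((m :: ms).length : Nat) : Int) - 1 = ((ms.length : Nat) : Int) := by
      simp
    rw [h2, h3, ih (pre ++ [""]) suf]
    simp

theorem pvBlankA_splice (res pre mid suf : List String) (start k : Int)
    (hres : res = pre ++ (mid ++ suf)) (hstart : start = (pre.length : Int))
    (hk : k = (mid.length : Int)) :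
    (pvBlankA res start k).1 = pre ++ (mid.map (fun _ => "") ++ suf) := by
  subst hres hstart hk
  exact pvBlankA_fst mid pre suf

theorem pvB0_get (s : List Char) (i : Nat) (h : i < s.length) :
    PySem.List.pyGetD (pvB0 s) (i : Int) "" = String.ofList [s[i]] := by
  rw [PySem.List.pyGetD_natCast]
  simp [pvB0, List.getD, h]

theorem pvOfList_single_eq_zero (x : Char) : (String.ofList [x] = "0") ↔ x = '0' := by
  rw [String.ofList_eq]
  constructor
  · intro h
    have h0 : ("0" : String).toList = ['0'] := by decide
    rw [h0] at h
    simpa using h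
  · intro h; subst h; decide

-- ---- the common intermediate: a run-skipping scan (proof-only; neither port computes with it) ----

def pvRunEnd (s : List Char) (j : Nat) : Nat :=
  if h : j < s.length then
    if s[j] = '0' then pvRunEnd s (j + 1) else j
  else j
termination_by s.length - j
decreasing_by exact pvDecNat j s.length (by assumption)

theorem pvRunEnd_ge (s : List Char) (j : Nat) : j ≤ pvRunEnd s j := by
  rw [pvRunEnd]
  split
  · split
    · have := pvRunEnd_ge s (j + 1); omega
    · exact le_refl j
  · exact le_refl j
termination_by s.length - j

theorem pvRunEnd_gt (s : List Char) (j : Nat) (hj : j < s.length) (h0 : s[j] = '0') :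
    j < pvRunEnd s j := by
  rw [pvRunEnd, dif_pos hj, if_pos h0]
  have := pvRunEnd_ge s (j + 1); omega

theorem pvDecScan (s : List Char) (i : Nat) (h : i < s.length) (h0 : s[i] = '0') :
    s.length - pvRunEnd s i < s.length - i := by
  have := pvRunEnd_gt s i h h0; omega

def pvScanB (s : List Char) (k : Int) (i : Nat) : List Char :=
  if h : i < s.length then
    if h0 : s[i] = '0' then
      if ((pvRunEnd s i : Int) - (i : Int) = k) then s.take i ++ s.drop (pvRunEnd s i)
      else pvScanB s k (pvRunEnd s i)
    else pvScanB s k (i + 1)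
  else s
termination_by s.length - i
decreasing_by
  · exact pvDecScan s i h h0
  · exact pvDecNat i s.length h

theorem pvRunEnd_stop (s : List Char) (i : Nat) (h : ¬ i < s.length) : pvRunEnd s i = i := by
  rw [pvRunEnd, dif_neg h]

theorem pvRunEnd_stop' (s : List Char) (i : Nat) (h : i < s.length) (h0 : ¬ s[i] = '0') :
    pvRunEnd s i = i := by
  rw [pvRunEnd, dif_pos h, if_neg h0]

theorem pvRunEnd_step (s : List Char) (i : Nat) (h : i < s.length) (h0 : s[i] = '0') :
    pvRunEnd s i = pvRunEnd s (i + 1) := by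
  conv_lhs => rw [pvRunEnd]
  rw [dif_pos h, if_pos h0]

theorem pvBlankA_zero (res : List String) (start : Int) : pvBlankA res start 0 = (res, 0) := by
  rw [pvBlankA]; simp

theorem pvDeadA (n d : Nat) : ∀ (i : Nat) (res : List String) (count start : Int),
    n - i ≤ d → pvFinalA (pvLoopA res count start 0 i n) = res := by
  induction d with
  | zero =>
    intro i res count start hd
    rw [pvLoopA, if_neg (by omega)]
    unfold pvFinalA
    split
    · rw [pvBlankA_zero]
    · rfl
  | succ d ih =>
    intro i res count start hd
    by_cases hi : i < n
    · rw [pvLoopA, if_pos hi]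
      split
      · exact ih (i + 1) _ _ _ (by omega)
      · split
        · rw [pvBlankA_zero]
          exact ih (i + 1) _ _ _ (by omega)
        · exact ih (i + 1) _ _ _ (by omega)
    · rw [pvLoopA, if_neg hi]
      unfold pvFinalA
      split
      · rw [pvBlankA_zero]
      · rfl

theorem pvScanB_runEnd (s : List Char) (k : Int) (hk : 0 < k) (i : Nat) :
    pvScanB s k i = if ((pvRunEnd s i : Int) - (i : Int) = k)
      then s.take i ++ s.drop (pvRunEnd s i) else pvScanB s k (pvRunEnd s i) := by
  by_cases hi : i < s.length
  · by_cases h0 : s[i] = '0'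
    · conv_lhs => rw [pvScanB]
      rw [dif_pos hi, dif_pos h0]
    · have hr : pvRunEnd s i = i := pvRunEnd_stop' s i hi h0
      rw [hr, if_neg (by omega)]
  · have hr : pvRunEnd s i = i := pvRunEnd_stop s i hi
    rw [hr, if_neg (by omega)]

-- decompose pvB0 s around a zero-run ending at i (c zero cells before position i)
theorem pvB0_split (s : List Char) (i c : Nat) (_hi : i ≤ s.length) (hc : c ≤ i) :
    pvB0 s = pvB0 (s.take (i - c)) ++ (pvB0 ((s.take i).drop (i - c)) ++ pvB0 (s.drop i)) := by
  unfold pvB0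
  rw [← List.map_append, ← List.map_append]
  congr 1
  rw [show s.take (i - c) = (s.take i).take (i - c) by rw [List.take_take]; congr 1; omega]
  rw [← List.append_assoc, List.take_append_drop, List.take_append_drop]

theorem pvMainA_base (s : List Char) (k : Int) (hk : 0 < k) (c : Nat) (hc : c ≤ s.length)
    (_hz : ∀ t, (ht : t < s.length) → s.length - c ≤ t → t < s.length → s[t] = '0') :
    PySem.Str.join "" (pvFinalA (pvLoopA (pvB0 s) (c : Int)
        (if c = 0 then -1 else (s.length : Int) - (c : Int)) k s.length s.length))
      = String.ofList (if ((c : Int) + (pvRunEnd s s.length : Int) - (s.length : Int) = k)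
          then s.take (s.length - c) ++ s.drop (pvRunEnd s s.length)
          else pvScanB s k (pvRunEnd s s.length)) := by
  rw [pvLoopA, if_neg (by omega)]
  have hre : pvRunEnd s s.length = s.length := pvRunEnd_stop s s.length (by omega)
  rw [hre]
  by_cases hck : (c : Int) = k
  · have hc1 : 1 ≤ c := by omega
    unfold pvFinalA
    rw [if_pos (by simpa using hck)]
    simp only
    rw [if_neg (by omega : ¬ c = 0)]
    rw [← hck]
    have hstart2 : (s.length : Int) - (c : Int) = ((s.length - c : Nat) : Int) := by
      push_cast [hc]; ring
    rw [hstart2]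
    have hsplit := pvB0_split s s.length c (le_refl _) hc
    have hlen1 : (pvB0 (s.take (s.length - c))).length = s.length - c := by
      simp [pvB0]
    have hlen2 : ((pvB0 ((s.take s.length).drop (s.length - c))).length : Int) = (c : Int) := by
      simp [pvB0]; omega
    rw [pvBlankA_splice (pvB0 s) (pvB0 (s.take (s.length - c)))
      (pvB0 ((s.take s.length).drop (s.length - c))) (pvB0 (s.drop s.length)) _ _
      hsplit (by rw [hlen1]) (by rw [hlen2])]
    have hmix := pvJoin_mixed (s.take (s.length - c))
      ((pvB0 ((s.take s.length).drop (s.length - c))).map (fun _ => "")) (s.drop s.length)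
      (by intro x hx
          obtain ⟨y, _, hy⟩ := List.mem_map.mp hx
          exact hy.symm)
    rw [hmix]
    rw [if_pos (show (c : Int) + (s.length : Int) - (s.length : Int) = (c : Int) by ring)]
  · unfold pvFinalA
    rw [if_neg (by simpa using hck)]
    rw [pvJoin_sing]
    rw [if_neg (by omega : ¬ (c : Int) + (s.length : Int) - (s.length : Int) = k)]
    congr 1
    rw [pvScanB, dif_neg (by omega)]

theorem pvMainA (s : List Char) (k : Int) (hk : 0 < k) (d : Nat) :
    ∀ (i c : Nat), s.length - i ≤ d → i ≤ s.length → c ≤ i →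
    (∀ t, (ht : t < s.length) → i - c ≤ t → t < i → s[t] = '0') →
    PySem.Str.join "" (pvFinalA (pvLoopA (pvB0 s) (c : Int)
        (if c = 0 then -1 else (i : Int) - (c : Int)) k i s.length))
      = String.ofList (if ((c : Int) + (pvRunEnd s i : Int) - (i : Int) = k)
          then s.take (i - c) ++ s.drop (pvRunEnd s i)
          else pvScanB s k (pvRunEnd s i)) := by
  induction d with
  | zero =>
    intro i c hd hi hc hz
    have hin : i = s.length := by omega
    subst hin
    exact pvMainA_base s k hk c hc hz
  | succ d ih =>
    intro i c hd hi hc hz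
    by_cases hin : i < s.length
    case neg =>
      have hieq : i = s.length := by omega
      subst hieq
      exact pvMainA_base s k hk c hc hz
    case pos =>
      rw [pvLoopA, if_pos (by simpa using hin)]
      rw [pvB0_get s i hin]
      by_cases h0 : s[i] = '0'
      · rw [if_pos ((pvOfList_single_eq_zero _).mpr h0)]
        have hstart : (if (if c = 0 then -1 else (i : Int) - (c : Int)) = -1 then (i : Int)
              else (if c = 0 then -1 else (i : Int) - (c : Int)))
            = (if c + 1 = 0 then -1 else ((i + 1 : Nat) : Int) - ((c + 1 : Nat) : Int)) := by
          by_cases hc0 : c = 0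
          · subst hc0; simp
          · rw [if_neg hc0, if_neg (by omega : ¬ c + 1 = 0)]
            rw [if_neg (by omega : ¬ (i : Int) - (c : Int) = -1)]
            push_cast; ring
        have hcount : (c : Int) + 1 = ((c + 1 : Nat) : Int) := by push_cast; ring
        rw [hstart, hcount]
        rw [ih (i + 1) (c + 1) (by omega) (by omega) (by omega)
          (by intro t ht h1 h2
              by_cases hti : t = i
              · subst hti; exact h0
              · exact hz t ht (by omega) (by omega))]
        rw [pvRunEnd_step s i hin h0]
        congr 1
        have harith : ((c + 1 : Nat) : Int) + (pvRunEnd s (i + 1) : Int) - ((i + 1 : Nat) : Int)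
            = (c : Int) + (pvRunEnd s (i + 1) : Int) - (i : Int) := by push_cast; ring
        rw [harith]
        rw [show i + 1 - (c + 1) = i - c by omega]
      · rw [if_neg (by rw [pvOfList_single_eq_zero]; exact h0)]
        have hre : pvRunEnd s i = i := pvRunEnd_stop' s i hin h0
        by_cases hck : (c : Int) = k
        · rw [if_pos hck]
          have hc1 : 1 ≤ c := by omega
          rw [if_neg (by omega : ¬ c = 0)]
          have hk0 : (0 : Int) ≤ k := le_of_lt hk
          rw [pvBlankA_snd _ _ _ hk0]
          rw [pvDeadA s.length (s.length - (i + 1)) (i + 1) _ _ _ (by omega)]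
          rw [← hck]
          have hstart2 : (i : Int) - (c : Int) = ((i - c : Nat) : Int) := by push_cast [hc]; ring
          rw [hstart2]
          have hsplit := pvB0_split s i c (le_of_lt hin) hc
          have hlen1 : (pvB0 (s.take (i - c))).length = i - c := by
            simp [pvB0]; omega
          have hlen2 : ((pvB0 ((s.take i).drop (i - c))).length : Int) = (c : Int) := by
            simp [pvB0]; omega
          rw [pvBlankA_splice (pvB0 s) (pvB0 (s.take (i - c)))
            (pvB0 ((s.take i).drop (i - c))) (pvB0 (s.drop i)) _ _
            hsplit (by rw [hlen1]) (by rw [hlen2])]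
          have hmix := pvJoin_mixed (s.take (i - c))
            ((pvB0 ((s.take i).drop (i - c))).map (fun _ => "")) (s.drop i)
            (by intro x hx
                obtain ⟨y, _, hy⟩ := List.mem_map.mp hx
                exact hy.symm)
          rw [hmix]
          rw [hre, if_pos (show (c : Int) + (i : Int) - (i : Int) = (c : Int) by ring)]
        · rw [if_neg hck]
          have ih0 := ih (i + 1) 0 (by omega) (by omega) (by omega) (by intro t ht h1 h2; omega)
          norm_num at ih0
          rw [ih0]
          rw [hre, if_neg (by omega : ¬ (c : Int) + (i : Int) - (i : Int) = k)]
          have hs1 : pvScanB s k i = pvScanB s k (i + 1) := by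
            conv_lhs => rw [pvScanB]
            rw [dif_pos hin, dif_neg h0]
          rw [hs1, pvScanB_runEnd s k hk (i + 1)]
          congr 1

-- ---- B side: run-length encoding bridged to the same scan ----

-- clean RLE of a char list, cons-style (proof-only)
def pvRunsOf : List Char → List (Char × Int)
  | [] => []
  | c :: rest =>
    match pvRunsOf rest with
    | [] => [(c, 1)]
    | (c', m) :: rs => if c = c' then (c, m + 1) :: rs else (c, 1) :: (c', m) :: rs

theorem pvRunsOf_nil : pvRunsOf [] = [] := rfl

theorem pvRunsOf_cons (c : Char) (rest : List Char) :
    pvRunsOf (c :: rest) = match pvRunsOf rest with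
      | [] => [(c, 1)]
      | (c', m) :: rs => if c = c' then (c, m + 1) :: rs else (c, 1) :: (c', m) :: rs := rfl

theorem pvRunsOf_head (t : List Char) (c : Char) :
    ∃ m rs, pvRunsOf (c :: t) = (c, m) :: rs ∧ 1 ≤ m := by
  induction t generalizing c with
  | nil => exact ⟨1, [], rfl, by omega⟩
  | cons x t' ih =>
    obtain ⟨m', rs', hx, hm'⟩ := ih x
    by_cases hcx : c = x
    · refine ⟨m' + 1, rs', ?_, by omega⟩
      rw [pvRunsOf_cons, hx]
      simp only [if_pos hcx]
    · refine ⟨1, (x, m') :: rs', ?_, by omega⟩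
      rw [pvRunsOf_cons, hx]
      simp only [if_neg hcx]

theorem pvRunsOf_split (n : Nat) (hn : 1 ≤ n) (c : Char) (t : List Char)
    (ht : t = [] ∨ ∃ x t', t = x :: t' ∧ x ≠ c) :
    pvRunsOf (List.replicate n c ++ t) = (c, (n : Int)) :: pvRunsOf t := by
  induction n with
  | zero => omega
  | succ n ih =>
    by_cases hn1 : 1 ≤ n
    · rw [List.replicate_succ, List.cons_append]
      rw [pvRunsOf_cons, ih hn1]
      simp only [if_pos trivial]
      push_cast; ring_nf
    · have hn0 : n = 0 := by omega
      subst hn0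
      simp only [List.replicate_succ, List.replicate_zero, List.nil_append, List.cons_append]
      rcases ht with h | ⟨x, t', ht', hx⟩
      · subst h
        rfl
      · subst ht'
        obtain ⟨m, rs, hx2, _⟩ := pvRunsOf_head t' x
        rw [pvRunsOf_cons, hx2]
        simp only [if_neg (fun h : c = x => hx h.symm)]
        rw [← hx2]
        norm_num

theorem pvEnc_runsOf (rest : List Char) :
    ∀ (runs : List (Char × Int)) (cur : Char) (n : Nat), 1 ≤ n →
    pvEnc rest runs cur (n : Int) = runs ++ pvRunsOf (List.replicate n cur ++ rest) := by
  induction rest with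
  | nil =>
    intro runs cur n hn
    rw [pvEnc, pvRunsOf_split n hn cur [] (Or.inl rfl)]
    simp [pvRunsOf_nil]
  | cons c t ih =>
    intro runs cur n hn
    rw [pvEnc]
    by_cases hc : c = cur
    · rw [if_pos hc]
      have : (n : Int) + 1 = ((n + 1 : Nat) : Int) := by push_cast; ring
      rw [this, ih runs cur (n + 1) (by omega)]
      subst hc
      congr 2
      simp [List.replicate_succ', List.append_assoc]
    · rw [if_neg hc]
      have h1 : (1 : Int) = ((1 : Nat) : Int) := rfl
      rw [h1, ih (runs ++ [(cur, (n : Int))]) c 1 (by omega)]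
      rw [pvRunsOf_split n hn cur (c :: t) (Or.inr ⟨c, t, rfl, hc⟩)]
      simp

-- decode characterisation (proof-only)
def pvDecL (k : Int) : List (Char × Int) → Bool → List Char
  | [], _ => []
  | (c, m) :: rs, removed =>
    if removed = false ∧ c = '0' ∧ m = k then pvDecL k rs true
    else List.replicate m.toNat c ++ pvDecL k rs removed

theorem pvRepeat_toList (c : Char) (m : Int) :
    (String.ofList (PySem.List.pyRepeat [c] m)).toList = List.replicate m.toNat c := by
  rw [PySem.List.pyRepeat_singleton]
  exact (String.ofList_eq.mp rfl).symm

theorem pvDec_chars (k : Int) (rs : List (Char × Int)) :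
    ∀ (removed : Bool) (out : List String),
    (((pvDec rs k removed out).2).map String.toList).flatten
      = (out.map String.toList).flatten ++ pvDecL k rs removed := by
  induction rs with
  | nil => intro removed out; simp [pvDec, pvDecL]
  | cons p t ih =>
    intro removed out
    obtain ⟨c, m⟩ := p
    rw [pvDec, pvDecL]
    by_cases h : removed = false ∧ c = '0' ∧ m = k
    · rw [if_pos h, if_pos h, ih]
    · rw [if_neg h, if_neg h, ih]
      simp only [List.map_append, List.map_cons, List.map_nil, List.flatten_append,
        List.flatten_cons, List.flatten_nil, pvRepeat_toList, List.append_nil,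
        List.append_assoc]

theorem pvDecL_true (k : Int) (rs : List (Char × Int)) :
    pvDecL k rs true = (rs.map (fun p => List.replicate p.2.toNat p.1)).flatten := by
  induction rs with
  | nil => rfl
  | cons p t ih =>
    obtain ⟨c, m⟩ := p
    rw [pvDecL, if_neg (by simp), ih]
    rfl

theorem pvRunsOf_decode (s : List Char) :
    ((pvRunsOf s).map (fun p => List.replicate p.2.toNat p.1)).flatten = s := by
  induction s with
  | nil => rfl
  | cons c t ih =>
    cases t with
    | nil => rfl
    | cons x t' =>
      obtain ⟨m, rs, hx, hm⟩ := pvRunsOf_head t' x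
      rw [hx] at ih
      by_cases hcx : c = x
      · subst hcx
        rw [pvRunsOf_cons, hx]
        simp only [if_pos trivial]
        simp only [List.map_cons, List.flatten_cons] at ih ⊢
        rw [show (m + 1).toNat = m.toNat + 1 by omega, List.replicate_succ]
        rw [List.cons_append, ih]
      · rw [pvRunsOf_cons, hx]
        simp only [if_neg hcx]
        simp only [List.map_cons, List.flatten_cons] at ih ⊢
        rw [ih]
        rfl

-- leading-run decomposition
def pvLead (c : Char) : List Char → Nat
  | [] => 0
  | x :: t => if x = c then pvLead c t + 1 else 0

theorem pvLead_take (c : Char) (s : List Char) :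
    s.take (pvLead c s) = List.replicate (pvLead c s) c := by
  induction s with
  | nil => rfl
  | cons x t ih =>
    rw [pvLead]
    by_cases hx : x = c
    · rw [if_pos hx, List.take_succ_cons, List.replicate_succ, ih, hx]
    · rw [if_neg hx]
      rfl

theorem pvLead_drop (c : Char) (s : List Char) :
    s.drop (pvLead c s) = [] ∨ ∃ x t', s.drop (pvLead c s) = x :: t' ∧ x ≠ c := by
  induction s with
  | nil => exact Or.inl rfl
  | cons x t ih =>
    rw [pvLead]
    by_cases hx : x = c
    · rw [if_pos hx]
      exact ih
    · rw [if_neg hx]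
      exact Or.inr ⟨x, t, rfl, hx⟩

theorem pvLead_le (c : Char) (s : List Char) : pvLead c s ≤ s.length := by
  induction s with
  | nil => exact le_refl 0
  | cons x t ih =>
    rw [pvLead]
    by_cases hx : x = c
    · rw [if_pos hx]; simpa using ih
    · rw [if_neg hx]; simp

theorem pvLead_decomp (c : Char) (s : List Char) :
    s = List.replicate (pvLead c s) c ++ s.drop (pvLead c s) := by
  conv_lhs => rw [← List.take_append_drop (pvLead c s) s]
  rw [pvLead_take]

-- pvRunEnd / pvScanB shift lemmas
theorem pvRunEnd_cons_succ (t : List Char) (x : Char) (j : Nat) :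
    pvRunEnd (x :: t) (j + 1) = pvRunEnd t j + 1 := by
  by_cases hj : j < t.length
  · rw [pvRunEnd, dif_pos (by simpa using Nat.succ_lt_succ hj)]
    conv_rhs => rw [pvRunEnd, dif_pos hj]
    simp only [List.getElem_cons_succ]
    split
    · exact pvRunEnd_cons_succ t x (j + 1)
    · rfl
  · rw [pvRunEnd_stop _ _ (by simp; omega), pvRunEnd_stop _ _ hj]
termination_by t.length - j
decreasing_by omega

theorem pvRunEnd_replicate (t : List Char)
    (ht : t = [] ∨ ∃ x t', t = x :: t' ∧ x ≠ '0') :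
    ∀ (n : Nat), pvRunEnd (List.replicate n '0' ++ t) 0 = n := by
  intro n
  induction n with
  | zero =>
    simp only [List.replicate_zero, List.nil_append]
    rcases ht with h | ⟨x, t', ht', hx⟩
    · subst h; exact pvRunEnd_stop [] 0 (by simp)
    · subst ht'; exact pvRunEnd_stop' (x :: t') 0 (by simp) (by simpa using hx)
  | succ n ih =>
    rw [List.replicate_succ, List.cons_append]
    rw [pvRunEnd_step _ 0 (by simp) (by simp)]
    rw [show (0 : Nat) + 1 = 0 + 1 from rfl, pvRunEnd_cons_succ, ih]

theorem pvScanB_cons_succ (t : List Char) (x : Char) (k : Int) (i : Nat) :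
    pvScanB (x :: t) k (i + 1) = x :: pvScanB t k i := by
  by_cases hi : i < t.length
  · by_cases h0 : t[i] = '0'
    · rw [pvScanB, dif_pos (by simpa using Nat.succ_lt_succ hi)]
      conv_rhs => rw [pvScanB, dif_pos hi]
      simp only [List.getElem_cons_succ]
      rw [dif_pos h0, dif_pos h0, pvRunEnd_cons_succ]
      by_cases hc : ((pvRunEnd t i : Int) - (i : Int) = k)
      · rw [if_pos (by push_cast; omega), if_pos hc]
        rw [List.take_succ_cons, List.drop_succ_cons]
        rfl
      · rw [if_neg (by push_cast; omega), if_neg hc]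
        exact pvScanB_cons_succ t x k (pvRunEnd t i)
    · rw [pvScanB, dif_pos (by simpa using Nat.succ_lt_succ hi)]
      conv_rhs => rw [pvScanB, dif_pos hi]
      simp only [List.getElem_cons_succ]
      rw [dif_neg h0, dif_neg h0]
      exact pvScanB_cons_succ t x k (i + 1)
  · rw [pvScanB, dif_neg (by simp; omega)]
    conv_rhs => rw [pvScanB, dif_neg hi]
termination_by t.length - i
decreasing_by
  · have := pvRunEnd_gt t i hi h0; omega
  · omega

theorem pvScanB_replicate_at (c : Char) (k : Int) (t : List Char) :
    ∀ (n : Nat), pvScanB (List.replicate n c ++ t) k n = List.replicate n c ++ pvScanB t k 0 := by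
  intro n
  induction n with
  | zero => simp
  | succ n ih =>
    rw [List.replicate_succ, List.cons_append, pvScanB_cons_succ, ih]
    rfl

theorem pvScanB_nonzero_prefix (c : Char) (hc : c ≠ '0') (k : Int) (t : List Char) :
    ∀ (n : Nat), pvScanB (List.replicate n c ++ t) k 0 = List.replicate n c ++ pvScanB t k 0 := by
  intro n
  induction n with
  | zero => simp
  | succ n ih =>
    rw [List.replicate_succ, List.cons_append]
    rw [pvScanB, dif_pos (by simp), dif_neg (by simpa using hc)]
    rw [show (0 : Nat) + 1 = 0 + 1 from rfl, pvScanB_cons_succ, ih]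
    rfl

-- the bridge: decoding the RLE with the first exact-k zero-run skipped IS the run scan
theorem pvBridge (k : Int) (d : Nat) :
    ∀ (s : List Char), s.length ≤ d →
    pvDecL k (pvRunsOf s) false = pvScanB s k 0 := by
  induction d with
  | zero =>
    intro s hd
    have : s = [] := List.eq_nil_of_length_eq_zero (by omega)
    subst this
    rw [pvScanB, dif_neg (by simp)]
    rfl
  | succ d ih =>
    intro s hd
    cases s with
    | nil =>
      rw [pvScanB, dif_neg (by simp)]
      rfl
    | cons c t =>
      have hn1 : 1 ≤ pvLead c (c :: t) := by rw [pvLead, if_pos rfl]; omega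
      have hdecomp := pvLead_decomp c (c :: t)
      have hdrop := pvLead_drop c (c :: t)
      set n := pvLead c (c :: t) with hn
      set rest := (c :: t).drop n with hrest
      have hruns : pvRunsOf (c :: t) = (c, (n : Int)) :: pvRunsOf rest := by
        conv_lhs => rw [hdecomp]
        exact pvRunsOf_split n hn1 c rest hdrop
      have hrestlen : rest.length ≤ d := by
        have := pvLead_le c (c :: t)
        have h1 : rest.length = (c :: t).length - n := by rw [hrest, List.length_drop]
        simp only [List.length_cons] at hd h1 ⊢
        omega
      rw [hruns, pvDecL]
      by_cases hcase : (false : Bool) = false ∧ c = '0' ∧ (n : Int) = k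
      · -- the first run is the removed one
        rw [if_pos hcase]
        obtain ⟨-, hc0, hnk⟩ := hcase
        rw [pvDecL_true, pvRunsOf_decode]
        conv_rhs => rw [hdecomp]
        rw [pvScanB, dif_pos (show 0 < (List.replicate n c ++ rest).length by simp only [List.length_append, List.length_replicate]; omega)]
        have hget : (List.replicate n c ++ rest)[0]'(by simp only [List.length_append, List.length_replicate]; omega) = '0' := by
          subst hc0
          rw [List.getElem_append_left (by simpa using hn1)]
          simp
        rw [dif_pos hget]
        have hre : pvRunEnd (List.replicate n c ++ rest) 0 = n := by
          subst hc0
          apply pvRunEnd_replicate rest _ n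
          rcases hdrop with h | ⟨x, t', h, hx⟩
          · exact Or.inl h
          · exact Or.inr ⟨x, t', h, hx⟩
        rw [hre, if_pos (by omega)]
        rw [List.take_zero, List.nil_append, List.drop_append_of_le_length (by simp)]
        simp
      · rw [if_neg hcase]
        rw [ih rest hrestlen]
        rw [Int.toNat_natCast]
        by_cases hc0 : c = '0'
        · -- zero run of the wrong length: the scan jumps over it
          have hnk : ¬ ((n : Int) = k) := by tauto
          conv_rhs => rw [hdecomp]
          have hget : (List.replicate n c ++ rest)[0]'(by simp only [List.length_append, List.length_replicate]; omega) = '0' := by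
            subst hc0
            rw [List.getElem_append_left (by simpa using hn1)]
            simp
          have hre : pvRunEnd (List.replicate n c ++ rest) 0 = n := by
            subst hc0
            apply pvRunEnd_replicate rest _ n
            rcases hdrop with h | ⟨x, t', h, hx⟩
            · exact Or.inl h
            · exact Or.inr ⟨x, t', h, hx⟩
          have hscan : pvScanB (List.replicate n c ++ rest) k 0
              = List.replicate n c ++ pvScanB rest k 0 := by
            rw [pvScanB, dif_pos (show 0 < (List.replicate n c ++ rest).length by simp only [List.length_append, List.length_replicate]; omega)]
            rw [dif_pos hget, hre, if_neg (by omega)]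
            exact pvScanB_replicate_at c k rest n
          rw [hscan]
        · -- non-zero run: copied verbatim by both
          conv_rhs => rw [hdecomp]
          rw [pvScanB_nonzero_prefix c hc0]

-- ===== VERDICT (by name: the statement is the Claim_ definition above) =====
theorem removeKzeros_spec : Claim_equal_removeKzeros := by
  unfold Claim_equal_removeKzeros
  intro str1 k _
  unfold Spec_removeKzeros removeKzeros removeKzeros_alt
  by_cases hs : str1 = ""
  · rw [if_pos (Or.inl hs), if_pos (Or.inl hs)]
  · by_cases hkneg : k < 0
    · rw [if_pos (Or.inr hkneg), if_pos (Or.inr (le_of_lt hkneg))]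
    · by_cases hk0 : k = 0
      · subst hk0
        rw [if_neg (by tauto), if_pos (Or.inr (le_refl 0))]
        rw [show str1.toList.map (fun c => String.ofList [c]) = pvB0 str1.toList from rfl]
        rw [pvDeadA str1.toList.length str1.toList.length 0 _ _ _ (by omega)]
        rw [pvJoin_sing]
        exact (String.ofList_eq.mpr rfl)
      · have hk : 0 < k := by omega
        rw [if_neg (by tauto), if_neg (show ¬(str1 = "" ∨ k ≤ 0) by simp [hs]; omega)]
        rw [show str1.toList.map (fun c => String.ofList [c]) = pvB0 str1.toList from rfl]
        -- A's side evaluates to the run scan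
        have hm := pvMainA str1.toList k hk str1.toList.length 0 0 (by omega) (by omega)
          (by omega) (by intro t ht h1 h2; omega)
        rw [if_pos rfl] at hm
        push_cast at hm
        have hA : PySem.Str.join ""
              (pvFinalA (pvLoopA (pvB0 str1.toList) 0 (-1) k 0 str1.toList.length))
            = String.ofList (pvScanB str1.toList k 0) := by
          rw [hm, pvScanB_runEnd str1.toList k hk 0]
          norm_num
        rw [hA]
        -- B's side evaluates to the same run scan
        cases hsl : str1.toList with
        | nil =>
          have hcontra : str1 = "" := by
            rw [← String.ofList_eq.mpr hsl.symm]
          exact absurd hcontra hs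
        | cons c0 rest =>
          change String.ofList (pvScanB (c0 :: rest) k 0)
            = PySem.Str.join "" (pvDec (pvEnc (c0 :: rest) [] c0 0) k false []).2
          rw [pvEnc_cons, if_pos rfl]
          rw [show ((0 : Int) + 1) = ((1 : Nat) : Int) from rfl]
          rw [pvEnc_runsOf rest [] c0 1 (le_refl 1)]
          rw [List.nil_append, show List.replicate 1 c0 ++ rest = c0 :: rest from rfl]
          have hBchars := pvDec_chars k (pvRunsOf (c0 :: rest)) false []
          rw [pvBridge k (c0 :: rest).length (c0 :: rest) (le_refl _)] at hBchars
          simp only [List.map_nil, List.flatten_nil, List.nil_append] at hBchars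
          have hjoin : (PySem.Str.join "" ((pvDec (pvRunsOf (c0 :: rest)) k false []).2)).toList
              = pvScanB (c0 :: rest) k 0 := by
            rw [PySem.Str.toList_join, show ("" : String).toList = ([] : List Char) from by decide,
              pvJoin_flatten, hBchars]
          exact String.ofList_eq.mpr hjoin.symm
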